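-- pv_equiv track=rewrite | github.com/Abjad/abjad | trunk/abjad/tools/listtools/get_cyclic.py | get_cyclic
-- ===== SOURCE A (Python) =====
-- def get_cyclic(l, start_index, stop_index):
--    '''Iterate ``l`` from ``start_index % len(l)`` to ``stop_index % len(l)``.
--
--    *  When ``start_index <= stop_index`` behave as the usual \
--       ``l[start_index:stop_index]``.
--    *  When ``stop_index < start_index`` wrap around the end of ``l``.
--
--    ::
--
--       abjad> l
--       [0, 1, 2, 3, 4, 5, 6, 7, 8, 9, 10, 11, 12, 13, 14, 15, 16, 17, 18, 19]
--
--    ::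
--
--       abjad> listtools.get_cyclic(l, 18, 10)
--       <generator object at 0x117daf8>
--       abjad> list(_)
--       [18, 19, 0, 1, 2, 3, 4, 5, 6, 7, 8, 9]
--
--    ::
--
--       abjad> listtools.get_cyclic(l, 10, 18)
--       <generator object at 0x117daf8>
--       abjad> list(_)
--       [10, 11, 12, 13, 14, 15, 16, 17]
--
--    ::
--
--       abjad> listtools.get_cyclic(l, 10, 10)
--       <generator object at 0x117daf8>
--       abjad> list(_)
--       []
--
--    Note that the output of this function is a generator.
--
--    .. todo:: Optimize the slow implementation given here.'''
--
--    len_l = len(l)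
--    cur_index = start_index
--    cyclic_stop_index = stop_index % len_l
--
--    while True:
--       cyclic_cur_index = cur_index % len_l
--       if cyclic_cur_index == cyclic_stop_index:
--          return
--       else:
--          yield l[cyclic_cur_index]
--          cur_index += 1
-- ===== SOURCE B (Python) =====
-- def get_cyclic(l, start_index, stop_index):
--     start = start_index % len(l)
--     stop = stop_index % len(l)
--     if start <= stop:
--         yield from l[start:stop]
--     else:
--         yield from l[start:]
--         yield from l[:stop]
-- ===== Notes on version B (the rewrite author's own statement) =====
-- stated objective: simpler
-- what changed: Replaces A's element-by-element while-True loop with per-step modulo and equality test by reducing both indices once and delegating to at most two plain list slices (l[start:stop], or l[start:] + l[:stop] on wraparound), with no per-element index arithmetic.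
import Mathlib
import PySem

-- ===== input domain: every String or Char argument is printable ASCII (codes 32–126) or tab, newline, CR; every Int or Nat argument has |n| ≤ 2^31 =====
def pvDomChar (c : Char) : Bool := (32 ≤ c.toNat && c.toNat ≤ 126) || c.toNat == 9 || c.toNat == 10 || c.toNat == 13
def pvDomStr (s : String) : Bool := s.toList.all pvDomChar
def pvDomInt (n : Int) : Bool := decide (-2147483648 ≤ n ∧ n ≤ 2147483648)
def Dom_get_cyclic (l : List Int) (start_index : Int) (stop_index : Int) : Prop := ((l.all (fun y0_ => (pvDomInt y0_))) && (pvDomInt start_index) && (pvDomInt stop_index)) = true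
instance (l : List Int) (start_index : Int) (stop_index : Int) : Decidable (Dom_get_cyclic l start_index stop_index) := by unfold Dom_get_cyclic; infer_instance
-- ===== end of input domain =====

-- B replaces A's element-by-element while-True loop (per-step modulo + equality test)
-- by reducing both indices once and returning at most two plain list slices
-- (l[start:stop], or l[start:] ++ l[:stop] on wraparound); equivalence is proved on
-- nonempty l (on empty l both Pythons raise ZeroDivisionError).

-- ===== PORT A =====
-- termination fact for A's while-loop, cited by the port's decreasing_by
theorem pvStep (len cs cur : Int) (hlen : 0 < len) (hcs0 : 0 ≤ cs) (hcsl : cs < len)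
    (hne : cur % len ≠ cs) :
    ((cs - (cur + 1)) % len).toNat < ((cs - cur) % len).toNat := by
  have hlen' : len ≠ 0 := ne_of_gt hlen
  have hd0 : 0 ≤ (cs - cur) % len := Int.emod_nonneg _ hlen'
  have hdlt : (cs - cur) % len < len := Int.emod_lt_of_pos _ hlen
  have hdne : (cs - cur) % len ≠ 0 := by
    intro h
    have h2 : cs % len = cur % len := Int.emod_eq_emod_iff_emod_sub_eq_zero.mpr h
    have h3 : cs % len = cs := Int.emod_eq_of_lt hcs0 hcsl
    exact hne (by omega)
  have h4 : cs - (cur + 1) = (cs - cur) - 1 := by ring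
  have h5 : (cs - (cur + 1)) % len = ((cs - cur) % len - 1) % len := by
    rw [h4, Int.sub_emod (cs - cur) 1 len, Int.sub_emod ((cs - cur) % len) 1 len,
      Int.emod_emod_of_dvd _ dvd_rfl]
  have h6 : ((cs - cur) % len - 1) % len = (cs - cur) % len - 1 :=
    Int.emod_eq_of_lt (by omega) (by omega)
  omega

-- A's 'while True' loop; the range guard on cyclic_stop only makes the recursion
-- total (the caller always passes cyclic_stop = stop_index % len_l, which satisfies it)
def get_cyclic_loop (l : List Int) (len_l : Int) (cyclic_stop : Int) (cur_index : Int) : List Int :=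
  if h : 0 < len_l ∧ 0 ≤ cyclic_stop ∧ cyclic_stop < len_l then
    let cyclic_cur_index := cur_index % len_l
    if h2 : cyclic_cur_index = cyclic_stop then []
    else
      -- l[cyclic_cur_index]: index is in range, so .getD 0 is exact
      ((PySem.List.pyGet? l cyclic_cur_index).getD 0) ::
        get_cyclic_loop l len_l cyclic_stop (cur_index + 1)
  else []
termination_by ((cyclic_stop - cur_index) % len_l).toNat
decreasing_by exact pvStep len_l cyclic_stop cur_index h.1 h.2.1 h.2.2 h2

def get_cyclic (l : List Int) (start_index : Int) (stop_index : Int) : List Int :=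
  let len_l : Int := l.length
  get_cyclic_loop l len_l (stop_index % len_l) start_index

-- ===== PORT B =====
def get_cyclic_alt (l : List Int) (start_index : Int) (stop_index : Int) : List Int :=
  let len : Int := l.length
  if 0 < len then  -- Python B raises ZeroDivisionError on empty l (outside Pre_)
    -- Python's '%' equals Lean's '%' here because the divisor len is positive
    let start := start_index % len
    let stop := stop_index % len
    if start ≤ stop then
      PySem.List.slice l (some start) (some stop)                         -- l[start:stop]
    else
      PySem.List.slice l (some start) none ++ PySem.List.slice l none (some stop)
                                                                          -- l[start:] ++ l[:stop]
  else []

-- ===== PRECONDITION & SPEC =====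
-- Pre_ excludes only the empty list, on which A (and B) raise ZeroDivisionError.
def Pre_get_cyclic (l : List Int) (start_index : Int) (stop_index : Int) : Prop := l ≠ []
instance (l : List Int) (start_index : Int) (stop_index : Int) : Decidable (Pre_get_cyclic l start_index stop_index) := by unfold Pre_get_cyclic; infer_instance
def pvWitness_get_cyclic : List Int × Int × Int := ([1, 2, 3, 4], 6, 1)

def Spec_get_cyclic (l : List Int) (start_index : Int) (stop_index : Int) (out : List Int) : Prop := out = get_cyclic_alt l start_index stop_index
instance (l : List Int) (start_index : Int) (stop_index : Int) (out : List Int) : Decidable (Spec_get_cyclic l start_index stop_index out) := by unfold Spec_get_cyclic; infer_instance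

-- ===== CLAIM (what is proved, stated in full; the proofs are below) =====
def Claim_equal_get_cyclic : Prop := ∀ (l : List Int) (start_index : Int) (stop_index : Int), Dom_get_cyclic l start_index stop_index → Pre_get_cyclic l start_index stop_index → Spec_get_cyclic l start_index stop_index (get_cyclic l start_index stop_index)

-- ===== LEMMAS AND PROOFS =====

-- A's loop equals a counted map over range ((cs - cur) % len)
theorem loop_eq_map (l : List Int) (len cs : Int) (hlen : 0 < len)
    (hcs0 : 0 ≤ cs) (hcsl : cs < len) :
    ∀ (n : Nat) (cur : Int), ((cs - cur) % len).toNat = n →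
      get_cyclic_loop l len cs cur =
        (List.range n).map
          (fun (i : Nat) => (PySem.List.pyGet? l ((cur + (i : Int)) % len)).getD 0) := by
  intro n
  induction n with
  | zero =>
    intro cur h
    have hd0 : 0 ≤ (cs - cur) % len := Int.emod_nonneg _ (ne_of_gt hlen)
    have hz : (cs - cur) % len = 0 := by omega
    have heq : cur % len = cs := by
      have h2 : cs % len = cur % len :=
        Int.emod_eq_emod_iff_emod_sub_eq_zero.mpr hz
      have h3 : cs % len = cs := Int.emod_eq_of_lt hcs0 hcsl
      omega
    rw [get_cyclic_loop]
    simp [hlen, hcs0, hcsl, heq]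
  | succ n ih =>
    intro cur h
    have hne : cur % len ≠ cs := by
      intro heq
      have : (cs - cur) % len = 0 := by
        apply (Int.emod_eq_emod_iff_emod_sub_eq_zero).1
        have h3 : cs % len = cs := Int.emod_eq_of_lt hcs0 hcsl
        omega
      omega
    have hstep := pvStep len cs cur hlen hcs0 hcsl hne
    have hnext : ((cs - (cur + 1)) % len).toNat = n := by
      have hd0 : 0 ≤ (cs - (cur + 1)) % len := Int.emod_nonneg _ (ne_of_gt hlen)
      have h4 : cs - (cur + 1) = (cs - cur) - 1 := by ring
      have h5 : (cs - (cur + 1)) % len = ((cs - cur) % len - 1) % len := by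
        rw [h4, Int.sub_emod (cs - cur) 1 len, Int.sub_emod ((cs - cur) % len) 1 len,
          Int.emod_emod_of_dvd _ dvd_rfl]
      have hd0' : 0 ≤ (cs - cur) % len := Int.emod_nonneg _ (ne_of_gt hlen)
      have hdlt : (cs - cur) % len < len := Int.emod_lt_of_pos _ hlen
      have h6 : ((cs - cur) % len - 1) % len = (cs - cur) % len - 1 :=
        Int.emod_eq_of_lt (by omega) (by omega)
      omega
    rw [get_cyclic_loop]
    simp only [hlen, hcs0, hcsl, and_self, dite_true, hne, dite_false]
    rw [ih (cur + 1) hnext, List.range_succ_eq_map, List.map_cons, List.map_map]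
    congr 1
    · norm_num
    · apply List.map_congr_left
      intro i _
      simp only [Function.comp_apply, Nat.succ_eq_add_one]
      congr 3
      push_cast
      ring

-- a counted map of in-range gets is a drop/take block of l
theorem map_range_pyGet (l : List Int) (a : Int) (n : Nat) (h0 : 0 ≤ a)
    (h : a.toNat + n ≤ l.length) :
    (List.range n).map (fun (i : Nat) => (PySem.List.pyGet? l (a + (i : Int))).getD 0) =
      (l.drop a.toNat).take n := by
  apply List.ext_getElem
  · simp [List.length_take, List.length_drop]; omega
  · intro i h1 h2
    simp only [List.getElem_map, List.getElem_range, List.getElem_take, List.getElem_drop]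
    have hi : i < n := by simpa using h1
    have hcast : a + (i : Int) = ((a.toNat + i : Nat) : Int) := by omega
    rw [hcast, PySem.List.pyGet?_natCast]
    simp [List.getElem?_eq_getElem (show a.toNat + i < l.length by omega)]

theorem get_cyclic_eq (l : List Int) (s t : Int) (hl : l ≠ []) :
    get_cyclic l s t = get_cyclic_alt l s t := by
  have hlen : 0 < (l.length : Int) := by
    simp only [Int.natCast_pos, List.length_pos_iff]; exact hl
  set n : Int := (l.length : Int) with hn
  have hne : n ≠ 0 := ne_of_gt hlen
  have ha0 : 0 ≤ s % n := Int.emod_nonneg _ hne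
  have hal : s % n < n := Int.emod_lt_of_pos _ hlen
  have hb0 : 0 ≤ t % n := Int.emod_nonneg _ hne
  have hbl : t % n < n := Int.emod_lt_of_pos _ hlen
  -- the element count only depends on s through s % n
  have hcount : (t % n - s) % n = (t % n - s % n) % n := by
    rw [Int.sub_emod (t % n) s n, Int.emod_emod_of_dvd _ dvd_rfl]
  -- the yielded indices only depend on s through s % n
  have hidx : ∀ (i : Nat), (s + (i : Int)) % n = (s % n + (i : Int)) % n := by
    intro i
    rw [Int.add_emod s i n, Int.add_emod (s % n) i n, Int.emod_emod_of_dvd _ dvd_rfl]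
  -- A = counted map over range ((t % n - s) % n)
  unfold get_cyclic
  rw [loop_eq_map l n (t % n) hlen hb0 hbl ((t % n - s) % n).toNat s rfl]
  unfold get_cyclic_alt
  simp only [← hn, if_pos hlen]
  by_cases hab : s % n ≤ t % n
  · -- no wraparound: count = t % n - s % n, all indices s % n + i stay below t % n
    have hc : (t % n - s % n) % n = t % n - s % n :=
      Int.emod_eq_of_lt (by omega) (by omega)
    rw [if_pos hab, hcount, hc]
    rw [List.map_congr_left (fun i hi => by
      have hilt : i < (t % n - s % n).toNat := by simpa using List.mem_range.1 hi
      rw [hidx i, Int.emod_eq_of_lt (by omega) (by omega)])]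
    rw [map_range_pyGet l (s % n) (t % n - s % n).toNat ha0 (by omega)]
    rw [PySem.List.slice_toNat l ha0 hb0]
    congr 1
    omega
  · -- wraparound: count = t % n - s % n + n, split the range at the end of the list
    have hab' : t % n < s % n := lt_of_not_ge hab
    have hc : (t % n - s % n) % n = t % n - s % n + n := by
      have h1 : (t % n - s % n + n) % n = t % n - s % n + n :=
        Int.emod_eq_of_lt (by omega) (by omega)
      calc (t % n - s % n) % n = (t % n - s % n + n * 1) % n := by
            rw [Int.add_mul_emod_self_left]
        _ = t % n - s % n + n := by rw [mul_one, h1]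
    rw [if_neg (by omega), hcount, hc]
    have hsplit : (t % n - s % n + n).toNat = (n - s % n).toNat + (t % n).toNat := by omega
    rw [hsplit, List.range_add, List.map_append, List.map_map]
    congr 1
    · -- first block: indices s % n .. n - 1, i.e. l[start:]
      rw [List.map_congr_left (fun i hi => by
        have hilt : i < (n - s % n).toNat := by simpa using List.mem_range.1 hi
        rw [hidx i, Int.emod_eq_of_lt (by omega) (by omega)])]
      rw [map_range_pyGet l (s % n) (n - s % n).toNat ha0 (by omega)]
      rw [PySem.List.slice_from l ha0]
      apply List.take_of_length_le
      simp [List.length_drop]; omega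
    · -- second block: indices 0 .. t % n - 1, i.e. l[:stop]
      rw [List.map_congr_left (fun i hi => by
        have hilt : i < (t % n).toNat := by simpa using List.mem_range.1 hi
        show (PySem.List.pyGet? l ((s + ((((n - s % n).toNat : Nat) + i : Nat) : Int)) % n)).getD 0 =
          (PySem.List.pyGet? l ((0 : Int) + (i : Int))).getD 0
        rw [hidx]
        congr 2
        have heq : (s % n + ((((n - s % n).toNat : Nat) + i : Nat) : Int)) = (i : Int) + n * 1 := by
          push_cast; omega
        rw [heq, Int.add_mul_emod_self_left, Int.emod_eq_of_lt (by omega) (by omega)]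
        omega)]
      rw [map_range_pyGet l 0 (t % n).toNat le_rfl (by omega)]
      rw [PySem.List.slice_to l hb0]
      simp

-- ===== VERDICT (by name: the statement is the Claim_ definition above) =====
theorem get_cyclic_spec : Claim_equal_get_cyclic := by
  intro l s t _ hpre
  exact get_cyclic_eq l s t hpre
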